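-- pv_equiv track=rewrite | github.com/PSgale/AdventOfCode | 2019/09/sensor_boost.py | check_phase_settings
-- ===== SOURCE A (Python) =====
-- def check_phase_settings(phase_settings):
--     digits = sorted(phase_settings)
--     if any(x >= 5 for x in digits):
--         return False
--     for i in range(len(digits) - 1):
--         if digits[i] == digits[i + 1]:
--             return False
--     return True
-- ===== SOURCE B (Python) =====
-- def check_phase_settings(phase_settings):
--     return (all(x < 5 for x in phase_settings)
--             and len(set(phase_settings)) == len(phase_settings))
-- ===== Notes on version B (the rewrite author's own statement) =====
-- stated objective: faster
-- what changed: B drops the sort and the adjacent-pair scan: it checks every value is < 5 and detects duplicates by comparing the size of set(phase_settings) with the list length.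
import Mathlib
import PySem

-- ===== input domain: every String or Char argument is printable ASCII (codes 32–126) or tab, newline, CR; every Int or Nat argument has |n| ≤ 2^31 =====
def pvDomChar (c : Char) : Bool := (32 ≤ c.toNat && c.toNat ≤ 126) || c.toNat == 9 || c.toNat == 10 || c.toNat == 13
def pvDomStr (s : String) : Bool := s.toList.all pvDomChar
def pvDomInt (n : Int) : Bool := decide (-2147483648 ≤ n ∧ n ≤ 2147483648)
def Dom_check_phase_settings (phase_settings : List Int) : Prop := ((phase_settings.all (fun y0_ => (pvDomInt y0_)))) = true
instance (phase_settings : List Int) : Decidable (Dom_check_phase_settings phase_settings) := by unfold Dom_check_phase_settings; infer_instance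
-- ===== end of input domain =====

-- B drops sorting + adjacent-pair scan in favour of an all-<5 check and a set-size comparison (objective: faster — hashing replaces the sort).

-- ===== PORT A =====
-- 'for i in range(len(digits)-1): if digits[i]==digits[i+1]: return False' — the early-return
-- loop is the short-circuiting List.all over the range; the indices are always in range, so
-- pyGetD with default 0 is exact.
def check_phase_settings (phase_settings : List Int) : Bool :=
  let digits := PySem.List.sorted phase_settings (fun x => x) false
  if digits.any (fun x => decide (x ≥ 5)) then false
  else
    (PySem.List.pyRange 0 ((digits.length : Int) - 1) 1).all
      (fun i => !(PySem.List.pyGetD digits i 0 == PySem.List.pyGetD digits (i + 1) 0))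

-- ===== PORT B =====
def check_phase_settings_alt (phase_settings : List Int) : Bool :=
  phase_settings.all (fun x => decide (x < 5)) &&
    ((PySem.Set.ofList phase_settings).length == phase_settings.length)

-- ===== PRECONDITION & SPEC =====
def Spec_check_phase_settings (phase_settings : List Int) (out : Bool) : Prop := out = check_phase_settings_alt phase_settings
instance (phase_settings : List Int) (out : Bool) : Decidable (Spec_check_phase_settings phase_settings out) := by unfold Spec_check_phase_settings; infer_instance

-- ===== CLAIM (what is proved, stated in full; the proofs are below) =====
def Claim_equal_check_phase_settings : Prop := ∀ (phase_settings : List Int), Dom_check_phase_settings phase_settings → Spec_check_phase_settings phase_settings (check_phase_settings phase_settings)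

-- ===== LEMMAS AND PROOFS =====

-- The range-of-adjacent-pairs loop, stated index-wise.
theorem adjScan_eq_true_iff (ys : List Int) :
    ((PySem.List.pyRange 0 ((ys.length : Int) - 1) 1).all
      (fun i => !(PySem.List.pyGetD ys i 0 == PySem.List.pyGetD ys (i + 1) 0)) = true)
    ↔ ∀ k : Nat, k + 1 < ys.length → ys.getD k 0 ≠ ys.getD (k + 1) 0 := by
  rw [List.all_eq_true]
  constructor
  · intro h k hk
    have hmem : (k : Int) ∈ PySem.List.pyRange 0 ((ys.length : Int) - 1) 1 := by
      rw [PySem.List.mem_pyRange_one]; omega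
    have := h _ hmem
    simp only [Bool.not_eq_eq_eq_not, Bool.not_true, beq_eq_false_iff_ne] at this
    have h1 : ((k : Int) + 1) = ((k + 1 : Nat) : Int) := by push_cast; ring
    rw [h1, PySem.List.pyGetD_natCast, PySem.List.pyGetD_natCast] at this
    exact this
  · intro h i hi
    rw [PySem.List.mem_pyRange_one] at hi
    obtain ⟨hi0, hi1⟩ := hi
    obtain ⟨k, rfl⟩ := Int.eq_ofNat_of_zero_le hi0
    have hk : k + 1 < ys.length := by omega
    have h1 : ((k : Int) + 1) = ((k + 1 : Nat) : Int) := by push_cast; ring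
    simp only [Bool.not_eq_eq_eq_not, Bool.not_true, beq_eq_false_iff_ne]
    rw [h1, PySem.List.pyGetD_natCast, PySem.List.pyGetD_natCast]
    exact h k hk

-- On a ≤-sorted list, no equal adjacent pair ↔ Nodup.
theorem adj_ne_iff_nodup (ys : List Int) (hs : ys.Pairwise (· ≤ ·)) :
    (∀ k : Nat, k + 1 < ys.length → ys.getD k 0 ≠ ys.getD (k + 1) 0) ↔ ys.Nodup := by
  have hmono : ∀ p q : Nat, (hpq : p ≤ q) → (hq : q < ys.length) →
      ys[p]'(Nat.lt_of_le_of_lt hpq hq) ≤ ys[q] := by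
    intro p q hpq hq
    rcases Nat.lt_or_ge p q with h | h
    · exact List.pairwise_iff_getElem.mp hs p q (by omega) hq h
    · have : p = q := by omega
      subst this; exact le_refl _
  constructor
  · intro h
    rw [List.Nodup, List.pairwise_iff_getElem]
    intro i j hi hj hij
    have hadj : ys[i] < ys[i + 1]'(by omega) := by
      have hne := h i (by omega)
      rw [List.getD_eq_getElem ys 0 (by omega), List.getD_eq_getElem ys 0 (by omega)] at hne
      exact lt_of_le_of_ne (hmono i (i + 1) (by omega) (by omega)) hne
    have hrest : ys[i + 1]'(by omega) ≤ ys[j] := hmono (i + 1) j (by omega) hj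
    exact ne_of_lt (lt_of_lt_of_le hadj hrest)
  · intro hnd k hk
    rw [List.getD_eq_getElem ys 0 (by omega), List.getD_eq_getElem ys 0 hk]
    exact List.pairwise_iff_getElem.mp hnd k (k + 1) (by omega) hk (by omega)

-- len(set(xs)) == len(xs) ↔ Nodup xs.
theorem ofList_length_iff_nodup (xs : List Int) :
    (PySem.Set.ofList xs).length = xs.length ↔ xs.Nodup := by
  have hnd : (PySem.Set.ofList xs : List Int).Nodup := PySem.Set.nodup_ofList xs
  have htf : (PySem.Set.ofList xs : List Int).toFinset = xs.toFinset := by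
    apply Finset.ext
    intro a
    simp [List.mem_toFinset, PySem.Set.mem_ofList]
  have h1 : (PySem.Set.ofList xs : List Int).length = xs.toFinset.card := by
    rw [← htf, List.toFinset_card_of_nodup hnd]
  rw [h1]
  have := @Multiset.toFinset_card_eq_card_iff_nodup Int _ (xs : Multiset Int)
  simpa using this

-- ===== VERDICT (by name: the statement is the Claim_ definition above) =====
theorem check_phase_settings_spec : Claim_equal_check_phase_settings := by
  intro xs _
  unfold Spec_check_phase_settings check_phase_settings check_phase_settings_alt
  set ys := PySem.List.sorted xs (fun x => x) false with hys
  have hperm : ys.Perm xs := PySem.List.sorted_perm xs (fun x => x) false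
  have hany : (ys.any (fun x => decide (x ≥ 5))) = (xs.any (fun x => decide (x ≥ 5))) :=
    hperm.any_eq
  by_cases hge : xs.any (fun x => decide (x ≥ 5)) = true
  · simp only [hany, hge, if_true]
    have hfalse : xs.all (fun x => decide (x < 5)) = false := by
      rw [List.any_eq_true] at hge
      obtain ⟨x, hx, hx5⟩ := hge
      rw [List.all_eq_false]
      refine ⟨x, hx, ?_⟩
      simp at hx5 ⊢; omega
    simp [hfalse]
  · rw [Bool.not_eq_true] at hge
    simp only [hany, hge, Bool.false_eq_true, if_false]
    have hall : xs.all (fun x => decide (x < 5)) = true := by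
      rw [List.all_eq_true]; intro x hx
      rw [List.any_eq_false] at hge
      have := hge x hx
      simp at this ⊢; omega
    rw [hall, Bool.true_and]
    have hpw : ys.Pairwise (· ≤ ·) := PySem.List.sorted_pairwise xs (fun x => x)
    have hnodup : (ys.Nodup ↔ xs.Nodup) := hperm.nodup_iff
    rw [Bool.eq_iff_iff, adjScan_eq_true_iff, adj_ne_iff_nodup ys hpw, hnodup,
        beq_iff_eq, ofList_length_iff_nodup]
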